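-- pv_equiv track=rewrite | github.com/kedro-org/kedro-plugins | kedro-datasets/kedro_datasets/_utils/databricks_utils.py | parse_glob_pattern
-- ===== SOURCE A (Python) =====
-- def parse_glob_pattern(pattern: str) -> str:
--     special = ("*", "?", "[")
--     clean = []
--     for part in pattern.split("/"):
--         if any(char in part for char in special):
--             break
--         clean.append(part)
--     return "/".join(clean)
-- ===== SOURCE B (Python) =====
-- def parse_glob_pattern(pattern: str) -> str:
--     last_slash = -1
--     for i, ch in enumerate(pattern):
--         if ch in "*?[":
--             return pattern[:last_slash] if last_slash != -1 else ""
--         if ch == "/":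
--             last_slash = i
--     return pattern
-- ===== Notes on version B (the rewrite author's own statement) =====
-- stated objective: alternative
-- what changed: A splits the pattern on the path separator, substring-tests every part for each glob metacharacter and joins the clean parts back together; B makes a single character-level pass that tracks the index of the last separator seen and, at the first glob metacharacter, returns the slice up to that separator (or the whole pattern if no metacharacter occurs).
import Mathlib
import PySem

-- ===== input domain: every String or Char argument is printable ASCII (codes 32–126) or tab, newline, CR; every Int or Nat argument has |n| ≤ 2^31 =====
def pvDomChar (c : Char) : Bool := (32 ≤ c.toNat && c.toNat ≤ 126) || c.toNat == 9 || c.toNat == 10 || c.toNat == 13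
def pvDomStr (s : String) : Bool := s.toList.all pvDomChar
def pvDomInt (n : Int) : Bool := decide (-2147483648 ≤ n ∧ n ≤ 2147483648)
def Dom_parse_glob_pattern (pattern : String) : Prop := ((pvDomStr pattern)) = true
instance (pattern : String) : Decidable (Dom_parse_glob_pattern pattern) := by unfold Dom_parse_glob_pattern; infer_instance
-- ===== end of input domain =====

-- B replaces A's split-on-'/' / test-each-part / join pipeline by a single character scan that
-- remembers the last '/' seen and truncates there at the first glob metacharacter (objective: alternative).

-- ===== PORT A =====
def pvSpecialA : List String := ["*", "?", "["]

-- the 'for part in …: if any(char in part …): break; clean.append(part)' loop, 'clean' as accumulator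
def pvCleanLoop : List String → List String → List String
  | [], clean => clean
  | part :: rest, clean =>
    if pvSpecialA.any (fun ch => PySem.Str.isIn ch part) then clean
    else pvCleanLoop rest (clean ++ [part])

def parse_glob_pattern (pattern : String) : String :=
  PySem.Str.join "/" (pvCleanLoop ((PySem.Str.split? pattern "/").getD []) [])

-- ===== PORT B =====
-- the 'for i, ch in enumerate(pattern)' loop of Source B: state = (remaining chars, i, last_slash)
def pvScan (orig : List Char) : List Char → Nat → Int → List Char
  | [], _, _ => orig
  | ch :: rest, i, lastSlash =>
    if PySem.Chars.isIn [ch] "*?[".toList then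
      if lastSlash ≠ -1 then PySem.Chars.slice orig none (some lastSlash) else []
    else pvScan orig rest (i + 1) (if ch = '/' then (i : Int) else lastSlash)

def parse_glob_pattern_alt (pattern : String) : String :=
  String.ofList (pvScan pattern.toList pattern.toList 0 (-1))

-- ===== PRECONDITION & SPEC =====
def Spec_parse_glob_pattern (pattern : String) (out : String) : Prop := out = parse_glob_pattern_alt pattern
instance (pattern : String) (out : String) : Decidable (Spec_parse_glob_pattern pattern out) := by unfold Spec_parse_glob_pattern; infer_instance

-- ===== CLAIM (what is proved, stated in full; the proofs are below) =====
def Claim_equal_parse_glob_pattern : Prop := ∀ (pattern : String), Dom_parse_glob_pattern pattern → Spec_parse_glob_pattern pattern (parse_glob_pattern pattern)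

-- ===== LEMMAS AND PROOFS =====

-- is c one of the glob metacharacters?
def pvSpec (c : Char) : Bool := c = '*' || c = '?' || c = '['

-- structural model of pattern.split("/")
def pvSplit : List Char → List (List Char)
  | [] => [[]]
  | c :: rest =>
    if c = '/' then [] :: pvSplit rest
    else match pvSplit rest with
      | [] => [[c]]
      | h :: t => (c :: h) :: t

-- one-pass model: none = no metacharacter; some (b, r) = metacharacter present,
-- b = it lies in the first '/'-segment, r = the truncated result (meaningful when ¬b)
def pvG : List Char → Option (Bool × List Char)
  | [] => none
  | c :: rest =>
    if pvSpec c then some (true, [])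
    else match pvG rest with
      | none => none
      | some (b, r) =>
        if c = '/' then some (false, if b then [] else '/' :: r)
        else some (b, if b then [] else c :: r)

def pvCut (l : List Char) : List Char :=
  match pvG l with
  | none => l
  | some (true, _) => []
  | some (false, r) => r

theorem pvSingleton_infix (a : Char) (l : List Char) : [a] <:+: l ↔ a ∈ l := by
  constructor
  · intro h; exact List.singleton_sublist.mp h.sublist
  · intro h
    obtain ⟨s, t, rfl⟩ := List.append_of_mem h
    exact ⟨s, t, by simp⟩

theorem pvIsIn_singleton (a : Char) (l : List Char) :
    PySem.Chars.isIn [a] l = decide (a ∈ l) := by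
  by_cases h : a ∈ l
  · simp [h, (PySem.Chars.isIn_iff_infix [a] l).mpr ((pvSingleton_infix a l).mpr h)]
  · have hn : PySem.Chars.isIn [a] l ≠ true := fun hc =>
      h ((pvSingleton_infix a l).mp ((PySem.Chars.isIn_iff_infix [a] l).mp hc))
    simp [h, Bool.eq_false_iff.mpr hn]

theorem pvSpec_mem (c : Char) : (decide (c ∈ ['*', '?', '['])) = pvSpec c := by
  by_cases h1 : c = '*' <;> by_cases h2 : c = '?' <;> by_cases h3 : c = '[' <;>
    simp [pvSpec, List.mem_cons, h1, h2, h3]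

theorem pvIsIn_special (c : Char) : PySem.Chars.isIn [c] "*?[".toList = pvSpec c := by
  rw [show "*?[".toList = ['*', '?', '['] from rfl, pvIsIn_singleton, pvSpec_mem]

theorem pvAnyTriple (p : List Char) :
    p.any pvSpec = (decide ('*' ∈ p) || decide ('?' ∈ p) || decide ('[' ∈ p)) := by
  rw [Bool.eq_iff_iff]
  simp only [List.any_eq_true, Bool.or_eq_true, decide_eq_true_eq, pvSpec]
  constructor
  · rintro ⟨c, hc, hs⟩
    rcases hs with (h | h) | h <;> · subst h; tauto
  · rintro ((h | h) | h)
    exacts [⟨'*', h, by simp⟩, ⟨'?', h, by simp⟩, ⟨'[', h, by simp⟩]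

theorem pvAnySpecial (p : List Char) :
    pvSpecialA.any (fun ch => PySem.Str.isIn ch (String.ofList p)) = p.any pvSpec := by
  simp only [pvSpecialA, List.any_cons, List.any_nil, PySem.Str.isIn, String.toList_ofList,
    Bool.or_false]
  rw [show ("*" : String).toList = ['*'] from rfl, show ("?" : String).toList = ['?'] from rfl,
    show ("[" : String).toList = ['['] from rfl, pvIsIn_singleton, pvIsIn_singleton,
    pvIsIn_singleton, pvAnyTriple]
  simp [Bool.or_assoc]

theorem pvSplit_ne_nil (l : List Char) : pvSplit l ≠ [] := by
  cases l with
  | nil => simp [pvSplit]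
  | cons c rest =>
    simp only [pvSplit]
    split
    · simp
    · split <;> simp

theorem pvGo_cons (n : Nat) (c : Char) (rest cur : List Char) (acc : List (List Char)) :
    PySem.Chars.splitOn.go ['/'] (n + 1) (c :: rest) cur acc
      = if ['/'].isPrefixOf (c :: rest) = true then
          PySem.Chars.splitOn.go ['/'] n rest [] (cur.reverse :: acc)
        else PySem.Chars.splitOn.go ['/'] n rest (c :: cur) acc := by
  rfl

theorem pvSplitOn_go (fuel : Nat) : ∀ (l cur : List Char) (acc : List (List Char)),
    l.length ≤ fuel →
    PySem.Chars.splitOn.go ['/'] fuel l cur acc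
      = acc.reverse ++ (match pvSplit l with
          | [] => []
          | h :: t => (cur.reverse ++ h) :: t) := by
  induction fuel with
  | zero =>
    intro l cur acc h
    have : l = [] := List.eq_nil_of_length_eq_zero (Nat.le_zero.mp h)
    subst this
    rw [PySem.Chars.splitOn.go.eq_def]
    simp [pvSplit]
  | succ n ih =>
    intro l cur acc h
    cases l with
    | nil =>
      rw [PySem.Chars.splitOn.go.eq_def]
      simp [pvSplit]
    | cons c rest =>
      have hlen : rest.length ≤ n := by simpa using h
      rw [pvGo_cons]
      by_cases hc : c = '/'
      · subst hc
        rw [if_pos (show List.isPrefixOf ['/'] ('/' :: rest) = true by simp [List.isPrefixOf])]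
        rw [ih rest [] (cur.reverse :: acc) hlen]
        have hps : pvSplit ('/' :: rest) = [] :: pvSplit rest := by simp [pvSplit]
        rw [hps]
        rcases hsp : pvSplit rest with _ | ⟨h1, t1⟩
        · exact absurd hsp (pvSplit_ne_nil rest)
        · simp
      · have hpre : List.isPrefixOf ['/'] (c :: rest) = false := by
          simp [List.isPrefixOf]
          exact fun hh => hc hh.symm
        rw [hpre]
        simp only [Bool.false_eq_true, if_false]
        rw [ih rest (c :: cur) acc hlen]
        have hps : pvSplit (c :: rest) = match pvSplit rest with
            | [] => [[c]]
            | h :: t => (c :: h) :: t := by simp [pvSplit, hc]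
        rw [hps]
        rcases hsp : pvSplit rest with _ | ⟨h1, t1⟩
        · exact absurd hsp (pvSplit_ne_nil rest)
        · simp

theorem pvSplitOn_eq (l : List Char) : PySem.Chars.splitOn l ['/'] = pvSplit l := by
  show PySem.Chars.splitOn.go ['/'] (l.length + 1) l [] [] = pvSplit l
  rw [pvSplitOn_go (l.length + 1) l [] [] (by omega)]
  rcases hsp : pvSplit l with _ | ⟨h1, t1⟩
  · exact absurd hsp (pvSplit_ne_nil l)
  · simp

-- char-level clean loop
def pvCleanC : List (List Char) → List (List Char) → List (List Char)
  | [], clean => clean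
  | p :: ps, clean => if p.any pvSpec then clean else pvCleanC ps (clean ++ [p])

theorem pvCleanLoop_map (ps : List (List Char)) : ∀ (clean : List (List Char)),
    pvCleanLoop (ps.map String.ofList) (clean.map String.ofList)
      = (pvCleanC ps clean).map String.ofList := by
  induction ps with
  | nil => intro clean; simp [pvCleanLoop, pvCleanC]
  | cons p ps ih =>
    intro clean
    simp only [List.map_cons, pvCleanLoop, pvCleanC, pvAnySpecial]
    split
    · rfl
    · rw [show clean.map String.ofList ++ [String.ofList p] = (clean ++ [p]).map String.ofList by simp]
      exact ih (clean ++ [p])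

theorem pvCleanC_acc (ps : List (List Char)) : ∀ (clean : List (List Char)),
    pvCleanC ps clean = clean ++ ps.takeWhile (fun p => !(p.any pvSpec)) := by
  induction ps with
  | nil => intro clean; simp [pvCleanC]
  | cons p ps ih =>
    intro clean
    simp only [pvCleanC, List.takeWhile_cons]
    by_cases h : p.any pvSpec <;> simp [h, ih]

-- pvG reports a first-segment metacharacter exactly when the head part of pvSplit has one
theorem pvG_first (l : List Char) : ∀ h t, pvSplit l = h :: t →
    ((∃ r, pvG l = some (true, r)) ↔ h.any pvSpec = true) := by
  induction l with
  | nil =>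
    intro h t he
    simp only [pvSplit] at he
    obtain ⟨rfl, rfl⟩ : [] = h ∧ ([] : List (List Char)) = t := by simpa using he.symm
    simp [pvG]
  | cons c rest ih =>
    intro h t he
    by_cases hc : pvSpec c = true
    · have hcs : c ≠ '/' := fun hh => by rw [hh] at hc; exact absurd hc (by decide)
      rcases hsp : pvSplit rest with _ | ⟨h1, t1⟩
      · exact absurd hsp (pvSplit_ne_nil rest)
      have hps : pvSplit (c :: rest) = (c :: h1) :: t1 := by simp [pvSplit, hcs, hsp]
      rw [hps] at he
      obtain ⟨rfl, rfl⟩ : c :: h1 = h ∧ t1 = t := by simpa using he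
      constructor
      · intro _; simp [List.any_cons, hc]
      · intro _; exact ⟨[], by simp [pvG, hc]⟩
    · by_cases hcs : c = '/'
      · subst hcs
        have hps : pvSplit ('/' :: rest) = [] :: pvSplit rest := by simp [pvSplit]
        rw [hps] at he
        obtain ⟨rfl, rfl⟩ : ([] : List Char) = h ∧ pvSplit rest = t := by simpa using he
        constructor
        · rintro ⟨r, hr⟩
          simp only [pvG, if_neg hc] at hr
          rcases hg : pvG rest with _ | ⟨b, r'⟩ <;> rw [hg] at hr <;> simp at hr
        · intro hh; simp at hh
      · rcases hsp : pvSplit rest with _ | ⟨h1, t1⟩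
        · exact absurd hsp (pvSplit_ne_nil rest)
        have hps : pvSplit (c :: rest) = (c :: h1) :: t1 := by simp [pvSplit, hcs, hsp]
        rw [hps] at he
        obtain ⟨rfl, rfl⟩ : c :: h1 = h ∧ t1 = t := by simpa using he
        have ihh := ih h1 t1 hsp
        have hcf : pvSpec c = false := Bool.eq_false_iff.mpr hc
        constructor
        · rintro ⟨r, hr⟩
          simp only [pvG, if_neg hc] at hr
          rcases hg : pvG rest with _ | ⟨b, r'⟩ <;> rw [hg] at hr
          · simp at hr
          · rcases b with _ | _
            · simp [hcs] at hr
            · have hh := ihh.mp ⟨r', hg⟩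
              simp [List.any_cons, hh]
        · intro hh
          have hh1 : h1.any pvSpec = true := by
            rcases (by simpa [List.any_cons, hcf] using hh : h1.any pvSpec = true) with h
            exact h
          obtain ⟨r, hg⟩ := ihh.mpr hh1
          exact ⟨[], by simp [pvG, hc, hg, hcs]⟩

-- join of ((c :: h) :: xs) peels the first char
theorem pvJoin_cons (c : Char) (h : List Char) (xs : List (List Char)) :
    PySem.Chars.join ['/'] ((c :: h) :: xs) = c :: PySem.Chars.join ['/'] (h :: xs) := by
  cases xs with
  | nil => simp [PySem.Chars.join_singleton]
  | cons q t => simp [PySem.Chars.join_cons_cons]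

-- A-side: split + clean-loop + join equals the one-pass cut
theorem pvA_eq_cut (l : List Char) :
    PySem.Chars.join ['/'] ((pvSplit l).takeWhile (fun p => !(p.any pvSpec))) = pvCut l := by
  induction l with
  | nil => simp [pvSplit, pvCut, pvG, List.takeWhile, PySem.Chars.join_singleton]
  | cons c rest ih =>
    by_cases hc : pvSpec c = true
    · have hcs : c ≠ '/' := fun hh => by rw [hh] at hc; exact absurd hc (by decide)
      rcases hsp : pvSplit rest with _ | ⟨h1, t1⟩
      · exact absurd hsp (pvSplit_ne_nil rest)
      have hps : pvSplit (c :: rest) = (c :: h1) :: t1 := by simp [pvSplit, hcs, hsp]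
      rw [hps, List.takeWhile_cons]
      simp [List.any_cons, hc, pvCut, pvG, PySem.Chars.join_nil]
    · have hcf : pvSpec c = false := Bool.eq_false_iff.mpr hc
      by_cases hcs : c = '/'
      · subst hcs
        have hps : pvSplit ('/' :: rest) = [] :: pvSplit rest := by simp [pvSplit]
        rcases hsp : pvSplit rest with _ | ⟨h1, t1⟩
        · exact absurd hsp (pvSplit_ne_nil rest)
        by_cases hh : h1.any pvSpec = true
        · obtain ⟨r, hg⟩ := (pvG_first rest h1 t1 hsp).mpr hh
          rw [hps, hsp, List.takeWhile_cons, List.takeWhile_cons]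
          simp [hh, pvCut, pvG, hc, hg, PySem.Chars.join_singleton]
        · have hg : ∀ r, pvG rest ≠ some (true, r) := fun r hr =>
            hh ((pvG_first rest h1 t1 hsp).mp ⟨r, hr⟩)
          rw [hps, hsp, List.takeWhile_cons]
          rw [if_pos (by simp)]
          rw [List.takeWhile_cons, if_pos (by simp [hh])]
          rw [PySem.Chars.join_cons_cons]
          rw [hsp, List.takeWhile_cons, if_pos (by simp [hh])] at ih
          rw [ih]
          rcases hgr : pvG rest with _ | ⟨b, r⟩
          · simp [pvCut, pvG, hc, hgr]
          · rcases b with _ | _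
            · simp [pvCut, pvG, hc, hgr]
            · exact absurd hgr (hg r)
      · rcases hsp : pvSplit rest with _ | ⟨h1, t1⟩
        · exact absurd hsp (pvSplit_ne_nil rest)
        have hps : pvSplit (c :: rest) = (c :: h1) :: t1 := by simp [pvSplit, hcs, hsp]
        by_cases hh : h1.any pvSpec = true
        · obtain ⟨r, hg⟩ := (pvG_first rest h1 t1 hsp).mpr hh
          rw [hps, List.takeWhile_cons]
          simp [List.any_cons, hcf, hh, pvCut, pvG, hg, hcs, PySem.Chars.join_nil]
        · have hg : ∀ r, pvG rest ≠ some (true, r) := fun r hr =>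
            hh ((pvG_first rest h1 t1 hsp).mp ⟨r, hr⟩)
          rw [hps, List.takeWhile_cons, if_pos (by simp [List.any_cons, hcf, hh])]
          rw [pvJoin_cons]
          rw [hsp, List.takeWhile_cons, if_pos (by simp [hh])] at ih
          rw [ih]
          rcases hgr : pvG rest with _ | ⟨b, r⟩
          · simp [pvCut, pvG, hc, hgr]
          · rcases b with _ | _
            · simp [pvCut, pvG, hc, hgr, hcs]
            · exact absurd hgr (hg r)

-- B-side: the scan loop equals the one-pass cut
theorem pvScan_eq (rest : List Char) : ∀ (pre : List Char) (ls : Int),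
    pvScan (pre ++ rest) rest pre.length ls
      = match pvG rest with
        | none => pre ++ rest
        | some (true, _) => if ls = -1 then [] else PySem.Chars.slice (pre ++ rest) none (some ls)
        | some (false, r) => pre ++ r := by
  induction rest with
  | nil => intro pre ls; simp [pvScan, pvG]
  | cons c rest ih =>
    intro pre ls
    simp only [pvScan, pvIsIn_special]
    by_cases hc : pvSpec c = true
    · rw [if_pos hc]
      have hg : pvG (c :: rest) = some (true, []) := by simp [pvG, hc]
      rw [hg]
      by_cases hls : ls = -1
      · simp [hls]
      · simp [hls]
    · rw [if_neg hc]
      by_cases hcs : c = '/'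
      · subst hcs
        rw [if_pos rfl]
        have e1 : pre ++ '/' :: rest = (pre ++ ['/']) ++ rest := by simp
        rw [e1, show pre.length + 1 = (pre ++ ['/']).length by simp,
          ih (pre ++ ['/']) (pre.length : Int)]
        rcases hgr : pvG rest with _ | ⟨b, r⟩
        · have hg : pvG ('/' :: rest) = none := by simp [pvG, hc, hgr]
          rw [hg]
        · rcases b with _ | _
          · have hg : pvG ('/' :: rest) = some (false, '/' :: r) := by simp [pvG, hc, hgr]
            rw [hg]; simp
          · have hg : pvG ('/' :: rest) = some (false, []) := by simp [pvG, hc, hgr]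
            rw [hg, if_neg (show ¬((pre.length : Int) = -1) by omega)]
            simp [PySem.Chars.slice, PySem.List.slice_to_natCast]
      · rw [if_neg hcs]
        have e1 : pre ++ c :: rest = (pre ++ [c]) ++ rest := by simp
        rw [e1, show pre.length + 1 = (pre ++ [c]).length by simp, ih (pre ++ [c]) ls]
        rcases hgr : pvG rest with _ | ⟨b, r⟩
        · have hg : pvG (c :: rest) = none := by simp [pvG, hc, hgr]
          rw [hg]
        · rcases b with _ | _
          · have hg : pvG (c :: rest) = some (false, c :: r) := by simp [pvG, hc, hgr, hcs]
            rw [hg]; simp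
          · have hg : pvG (c :: rest) = some (true, []) := by simp [pvG, hc, hgr, hcs]
            rw [hg]

theorem pvB_eq_cut (l : List Char) : pvScan l l 0 (-1) = pvCut l := by
  have h := pvScan_eq l [] (-1)
  simp only [List.nil_append, List.length_nil] at h
  rw [h]
  unfold pvCut
  rcases pvG l with _ | ⟨b, r⟩
  · rfl
  · rcases b with _ | _ <;> simp

-- ===== VERDICT (by name: the statement is the Claim_ definition above) =====
theorem parse_glob_pattern_spec : Claim_equal_parse_glob_pattern := by
  intro pattern _
  unfold Spec_parse_glob_pattern parse_glob_pattern parse_glob_pattern_alt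
  rw [pvB_eq_cut]
  have hsplit : PySem.Str.split? pattern "/" = some ((pvSplit pattern.toList).map String.ofList) := by
    simp only [PySem.Str.split?, PySem.Chars.split?]
    rw [show ("/" : String).toList = ['/'] from rfl]
    simp [pvSplitOn_eq]
  rw [hsplit]
  simp only [Option.getD_some]
  rw [show ([] : List String) = ([] : List (List Char)).map String.ofList from rfl,
    pvCleanLoop_map, pvCleanC_acc]
  simp only [List.nil_append]
  simp only [PySem.Str.join]
  rw [List.map_map]
  rw [show (String.toList ∘ String.ofList) = id from funext fun l => String.toList_ofList,
    List.map_id]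
  rw [show ("/" : String).toList = ['/'] from rfl, pvA_eq_cut]
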